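-- pv_equiv track=rewrite | github.com/an0mium/aragora | aragora/agents/test_generator.py | _extract_decorators
-- ===== SOURCE A (Python) =====
-- from typing import Any, Dict, List, Optional
--
-- def _extract_decorators(lines: List[str], func_line: int) -> List[str]:
--     """Extract decorators above function definition."""
--     decorators = []
--     for i in range(func_line - 1, max(func_line - 10, -1), -1):
--         line = lines[i].strip()
--         if line.startswith("@"):
--             decorators.append(line)
--         elif line and not line.startswith("#"):
--             break
--     return list(reversed(decorators))
-- ===== SOURCE B (Python) =====
-- from typing import List
--
-- def _extract_decorators(lines: List[str], func_line: int) -> List[str]: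
--     """Extract decorators above function definition (staged pipeline)."""
--     window = [l.strip() for l in lines[max(func_line - 9, 0):max(func_line, 0)]]
--     cut = 0
--     for idx, line in enumerate(window):
--         if line and not (line.startswith("@") or line.startswith("#")):
--             cut = idx + 1
--     return [l for l in window[cut:] if l.startswith("@")]
-- ===== Notes on version B (the rewrite author's own statement) =====
-- stated objective: alternative
-- what changed: Replaces the backward index scan with break-then-reverse by a staged pipeline: slice-and-strip the 9-line window, locate the position after the last real code line with an enumerate fold, then filter the remaining suffix for '@' lines.
import Mathlib
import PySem

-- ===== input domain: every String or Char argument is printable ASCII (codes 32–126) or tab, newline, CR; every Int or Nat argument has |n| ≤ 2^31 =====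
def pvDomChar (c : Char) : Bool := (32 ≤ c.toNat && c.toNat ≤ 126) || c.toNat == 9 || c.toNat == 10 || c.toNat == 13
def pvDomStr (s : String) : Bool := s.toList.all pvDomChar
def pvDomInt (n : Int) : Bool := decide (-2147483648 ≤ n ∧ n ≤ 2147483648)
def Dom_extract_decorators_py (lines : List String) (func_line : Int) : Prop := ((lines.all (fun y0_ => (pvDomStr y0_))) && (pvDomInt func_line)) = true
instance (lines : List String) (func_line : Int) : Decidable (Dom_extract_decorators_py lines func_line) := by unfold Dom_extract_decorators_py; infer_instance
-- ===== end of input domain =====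

-- B replaces A's backward scan with break and final reversal by a staged
-- pipeline: slice+strip the window, an enumerate-fold finds the position after
-- the last real code line, and a filter keeps the '@' lines of the suffix
-- (alternative decomposition, same cost).


-- ===== PORT A =====
-- backward loop over range(func_line-1, max(func_line-10,-1), -1); break on a
-- non-empty non-'#' non-'@' line (the break returns the accumulator as is).
def pvALoop (lines : List String) : List Int → List String → List String
  | [], acc => acc
  | i :: rest, acc =>
    let line := PySem.Str.strip (PySem.List.pyGetD lines i "")
    if PySem.Str.startswith line "@" then pvALoop lines rest (acc ++ [line])
    else if line ≠ "" ∧ ¬ PySem.Str.startswith line "#" then acc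
    else pvALoop lines rest acc

def extract_decorators_py (lines : List String) (func_line : Int) : List String :=
  (pvALoop lines (PySem.List.pyRange (func_line - 1) (max (func_line - 10) (-1)) (-1)) []).reverse

-- ===== PORT B =====
-- B-side helpers: the two line tests of Source B
def pvIsAt (l : String) : Bool := PySem.Str.startswith l "@"
def pvIsBreak (l : String) : Bool :=
  (!(l == "")) && (!(PySem.Str.startswith l "@" || PySem.Str.startswith l "#"))

-- staged pipeline: stripped window slice; cut = index after the last code line
-- (enumerate fold); filter the suffix window[cut:] for '@' lines.
def extract_decorators_py_alt (lines : List String) (func_line : Int) : List String :=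
  let window := (PySem.List.slice lines (some (max (func_line - 9) 0)) (some (max func_line 0))).map PySem.Str.strip
  let cut := (PySem.List.enumerate window).foldl
    (fun c p => if pvIsBreak p.2 then p.1 + 1 else c) 0
  (PySem.List.slice window (some cut) none).filter pvIsAt

-- ===== PRECONDITION & SPEC =====
-- A raises IndexError (lines[func_line-1]) when func_line > len(lines); excluded.
def Pre_extract_decorators_py (lines : List String) (func_line : Int) : Prop :=
  func_line ≤ lines.length
instance (lines : List String) (func_line : Int) : Decidable (Pre_extract_decorators_py lines func_line) := by unfold Pre_extract_decorators_py; infer_instance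
def pvWitness_extract_decorators_py : List String × Int := (["@dec", "def f():"], 1)

def Spec_extract_decorators_py (lines : List String) (func_line : Int) (out : List String) : Prop := out = extract_decorators_py_alt lines func_line
instance (lines : List String) (func_line : Int) (out : List String) : Decidable (Spec_extract_decorators_py lines func_line out) := by unfold Spec_extract_decorators_py; infer_instance

-- ===== CLAIM (what is proved, stated in full; the proofs are below) =====
def Claim_equal_extract_decorators_py : Prop := ∀ (lines : List String) (func_line : Int), Dom_extract_decorators_py lines func_line → Pre_extract_decorators_py lines func_line → Spec_extract_decorators_py lines func_line (extract_decorators_py lines func_line)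
-- ===== LEMMAS AND PROOFS =====

-- pure form of A's scan over the (already stripped) lines, bottom-up
def pvScan : List String → List String
  | [] => []
  | l :: r =>
    if PySem.Str.startswith l "@" then l :: pvScan r
    else if l ≠ "" ∧ ¬ PySem.Str.startswith l "#" then []
    else pvScan r

-- pure form of B's cut fold
def pvCut (rows : List String) : Int :=
  (PySem.List.enumerate rows).foldl (fun c p => if pvIsBreak p.2 then p.1 + 1 else c) 0

theorem pvALoop_eq_scan (lines : List String) (L : List Int) (acc : List String) :
    pvALoop lines L acc =
      acc ++ pvScan (L.map (fun i => PySem.Str.strip (PySem.List.pyGetD lines i ""))) := by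
  induction L generalizing acc with
  | nil => simp [pvALoop, pvScan]
  | cons i rest ih =>
    simp only [pvALoop, List.map_cons, pvScan]
    split_ifs with h1 h2
    · rw [ih]; simp
    · simp
    · exact ih acc

theorem pvCut_snoc (xs : List String) (l : String) :
    pvCut (xs ++ [l]) = if pvIsBreak l then (xs.length : Int) + 1 else pvCut xs := by
  unfold pvCut
  rw [PySem.List.enumerate_append, List.foldl_append]
  simp [PySem.List.enumerate]

theorem pvCut_bounds (rows : List String) : 0 ≤ pvCut rows ∧ pvCut rows ≤ rows.length := by
  induction rows using List.reverseRecOn with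
  | nil => simp [pvCut, PySem.List.enumerate]
  | append_singleton xs l ih =>
    rw [pvCut_snoc]
    by_cases h : pvIsBreak l = true <;> simp [h] <;> omega

-- core: A's bottom-up scan, reversed, is B's drop-at-cut-then-filter
theorem pvScan_rev_eq (rows : List String) :
    (pvScan rows.reverse).reverse = (rows.drop (pvCut rows).toNat).filter pvIsAt := by
  induction rows using List.reverseRecOn with
  | nil => simp [pvScan, pvCut, PySem.List.enumerate]
  | append_singleton xs l ih =>
    have hle : (pvCut xs).toNat ≤ xs.length := by have := pvCut_bounds xs; omega
    rw [List.reverse_append, pvCut_snoc]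
    simp only [List.reverse_singleton, List.singleton_append, pvScan]
    by_cases hl : l = ""
    · subst hl
      have hb : pvIsBreak "" = false := by decide
      have h1 : PySem.Chars.startswith ("" : String).toList ['@'] = false := by decide
      simp only [hb, Bool.false_eq_true, if_false]
      rw [List.drop_append_of_le_length hle, List.filter_append, ← ih]
      have h1' : PySem.Chars.startswith ([] : List Char) ['@'] = false := by decide
      simp [pvIsAt, h1']
    · cases h1 : PySem.Chars.startswith l.toList ['@'] with
      | true =>
        have hb : pvIsBreak l = false := by simp [pvIsBreak, h1]
        simp only [hb, Bool.false_eq_true, if_false]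
        rw [List.drop_append_of_le_length hle, List.filter_append, ← ih]
        simp [pvIsAt, h1]
      | false =>
        cases h3 : PySem.Chars.startswith l.toList ['#'] with
        | true =>
          have hb : pvIsBreak l = false := by simp [pvIsBreak, h3]
          simp only [hb, Bool.false_eq_true, if_false]
          rw [List.drop_append_of_le_length hle, List.filter_append, ← ih]
          simp [pvIsAt, h1, h3]
        | false =>
          have hb : pvIsBreak l = true := by simp [pvIsBreak, h1, h3, hl]
          simp only [hb, if_true]
          have hlen : (((xs.length : Int)) + 1).toNat = (xs ++ [l]).length := by
            simp only [List.length_append, List.length_cons, List.length_nil]; omega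
          rw [hlen, List.drop_length]
          simp [h1, h3, hl]

-- mapping an index range over getD is the corresponding drop/take slice
theorem pvMapRange (xs : List String) (a n : Nat) (h : a + n ≤ xs.length) :
    (PySem.List.pyRange (a : Int) ((a : Int) + (n : Int)) 1).map
        (fun i => PySem.List.pyGetD xs i "") = (xs.drop a).take n := by
  induction n generalizing a with
  | zero => simp [PySem.List.pyRange_one_eq_nil]
  | succ n ih =>
    rw [PySem.List.pyRange_one_cons (by omega)]
    have ha : a < xs.length := by omega
    rw [List.map_cons]
    have h1 : ((a : Int) + 1) = ((a + 1 : Nat) : Int) := by push_cast; ring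
    have h2 : ((a : Int) + ((n + 1 : Nat) : Int)) = ((a + 1 : Nat) : Int) + (n : Int) := by
      push_cast; ring
    rw [h2, h1, ih (a + 1) (by omega)]
    have hget : PySem.List.pyGetD xs (a : Int) "" = xs[a] := by
      rw [PySem.List.pyGetD_natCast, List.getD_eq_getElem _ _ ha]
    rw [hget, List.drop_eq_getElem_cons ha, List.take_succ_cons]

-- range-map with strip, as a drop/take window
theorem pvMapRangeStrip (xs : List String) (a n : Nat) (h : a + n ≤ xs.length) :
    (PySem.List.pyRange (a : Int) ((a : Int) + (n : Int)) 1).map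
        (fun i => PySem.Str.strip (PySem.List.pyGetD xs i "")) =
      ((xs.drop a).take n).map PySem.Str.strip := by
  calc (PySem.List.pyRange (a : Int) ((a : Int) + (n : Int)) 1).map
          (fun i => PySem.Str.strip (PySem.List.pyGetD xs i ""))
      = ((PySem.List.pyRange (a : Int) ((a : Int) + (n : Int)) 1).map
          (fun i => PySem.List.pyGetD xs i "")).map PySem.Str.strip := by
        rw [List.map_map]; rfl
    _ = ((xs.drop a).take n).map PySem.Str.strip := by rw [pvMapRange xs a n h]

-- ===== VERDICT (by name: the statement is the Claim_ definition above) =====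
theorem extract_decorators_py_spec : Claim_equal_extract_decorators_py := by
  intro lines func_line _ hpre
  unfold Pre_extract_decorators_py at hpre
  unfold Spec_extract_decorators_py extract_decorators_py extract_decorators_py_alt
  rw [pvALoop_eq_scan, List.nil_append, PySem.List.pyRange_neg_one_eq_reverse]
  have e1 : max (func_line - 10) (-1) + 1 = max (func_line - 9) 0 := by omega
  have e2 : func_line - 1 + 1 = func_line := by ring
  rw [e1, e2]
  have e3 : PySem.List.pyRange (max (func_line - 9) 0) func_line 1
      = PySem.List.pyRange (max (func_line - 9) 0) (max func_line 0) 1 := by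
    by_cases h : 0 ≤ func_line
    · rw [max_eq_left h]
    · rw [PySem.List.pyRange_one_eq_nil (by omega), PySem.List.pyRange_one_eq_nil (by omega)]
  rw [e3]
  set aN := (max (func_line - 9) 0).toNat with haN
  set bN := (max func_line 0).toNat with hbN
  set n := bN - aN with hn
  have hcast1 : max (func_line - 9) 0 = (aN : Int) := by omega
  have hcast2 : max func_line 0 = ((aN : Int) + (n : Int)) := by omega
  have hlen : aN + n ≤ lines.length := by omega
  rw [hcast1, hcast2, List.map_reverse, pvMapRangeStrip lines aN n hlen,
      PySem.List.slice_natCast_add]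
  show (pvScan (((lines.drop aN).take n).map PySem.Str.strip).reverse).reverse =
    (PySem.List.slice (((lines.drop aN).take n).map PySem.Str.strip)
      (some (pvCut (((lines.drop aN).take n).map PySem.Str.strip))) none).filter pvIsAt
  rw [pvScan_rev_eq]
  congr 1
  exact (PySem.List.slice_from _ (pvCut_bounds _).1).symm
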